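-- pv_equiv track=rewrite | github.com/JeonghwanKim30/Algorithm | Programmers/Lv_0/문자열 밀기.py | solution
-- ===== SOURCE A (Python) =====
-- def solution(A, B):
--     answer = -1
--     new = ''
--     if(A==B) : return 0
--     for i in range(1,len(A)):
--         new = A[-i:] + A[0:len(A)-i]
--         if(new == B):
--             answer =i
--             break
--
--     return answer
-- ===== SOURCE B (Python) =====
-- def solution(A, B):
--     if A == B:
--         return 0
--     n = len(A)
--     if n != len(B):
--         return -1
--     j = (A + A).rfind(B, 1, 2 * n - 1)
--     return -1 if j == -1 else n - j
-- ===== Notes on version B (the rewrite author's own statement) =====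
-- stated objective: faster
-- what changed: Instead of building every right-rotation of A and comparing it with B (O(n^2)), B does one substring search: it rfinds B in A+A within [1, 2n-1) and maps the rightmost occurrence j to the smallest shift n - j.
import Mathlib
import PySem

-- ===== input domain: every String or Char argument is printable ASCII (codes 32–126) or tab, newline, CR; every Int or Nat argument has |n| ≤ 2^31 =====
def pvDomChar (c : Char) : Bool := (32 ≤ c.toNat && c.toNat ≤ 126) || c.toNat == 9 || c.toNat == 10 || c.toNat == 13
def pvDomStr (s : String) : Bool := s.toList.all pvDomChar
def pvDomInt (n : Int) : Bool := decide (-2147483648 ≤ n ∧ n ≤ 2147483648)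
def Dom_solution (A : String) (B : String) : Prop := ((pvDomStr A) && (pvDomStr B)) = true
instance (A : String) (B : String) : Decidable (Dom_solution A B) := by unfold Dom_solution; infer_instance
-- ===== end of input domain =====

-- B replaces A's scan over all right-rotations by a single rfind of B in (A+A); same return value, proved below.

-- ===== PORT A =====
-- the 'for i in range(1, len(A))' loop with its break: first i whose rotation equals B, else -1
def solLoop (Al Bl : List Char) : List Int → Int
  | [] => -1
  | i :: rest =>
      let new := PySem.List.slice Al (some (-i)) none ++
                 PySem.List.slice Al (some 0) (some ((Al.length : Int) - i))
      if new = Bl then i else solLoop Al Bl rest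

def solution (A : String) (B : String) : Int :=
  if A.toList = B.toList then 0
  else solLoop A.toList B.toList (PySem.List.pyRange 1 (A.toList.length : Int) 1)

-- ===== PORT B =====
def solution_alt (A : String) (B : String) : Int :=
  if A.toList = B.toList then 0
  else if A.toList.length ≠ B.toList.length then -1
  else
    let n : Int := A.toList.length
    let j := PySem.Chars.rfindFrom (A.toList ++ A.toList) B.toList 1 (some (2 * n - 1))
    if j = -1 then -1 else n - j

-- ===== PRECONDITION & SPEC =====
def Spec_solution (A : String) (B : String) (out : Int) : Prop := out = solution_alt A B
instance (A : String) (B : String) (out : Int) : Decidable (Spec_solution A B out) := by unfold Spec_solution; infer_instance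

-- ===== CLAIM (what is proved, stated in full; the proofs are below) =====
def Claim_equal_solution : Prop := ∀ (A : String) (B : String), Dom_solution A B → Spec_solution A B (solution A B)

-- ===== LEMMAS AND PROOFS =====

-- the right-rotation of a whose cut point is j
def rotAt (a : List Char) (j : Nat) : List Char := a.drop j ++ a.take j

lemma length_rotAt (a : List Char) (j : Nat) (h : j ≤ a.length) :
    (rotAt a j).length = a.length := by
  simp [rotAt]
  omega

-- ---- A-side loop shape ----
lemma solLoop_append (Al Bl : List Char) (l1 l2 : List Int)
    (h : ∀ i ∈ l1, PySem.List.slice Al (some (-i)) none ++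
        PySem.List.slice Al (some 0) (some ((Al.length : Int) - i)) ≠ Bl) :
    solLoop Al Bl (l1 ++ l2) = solLoop Al Bl l2 := by
  induction l1 with
  | nil => rfl
  | cons i t ih =>
      simp only [List.cons_append, solLoop]
      rw [if_neg (h i (by simp))]
      exact ih (fun x hx => h x (by simp [hx]))

lemma solLoop_all_ne (Al Bl : List Char) (l : List Int)
    (h : ∀ i ∈ l, PySem.List.slice Al (some (-i)) none ++
        PySem.List.slice Al (some 0) (some ((Al.length : Int) - i)) ≠ Bl) :
    solLoop Al Bl l = -1 := by
  have := solLoop_append Al Bl l [] h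
  simpa using this

-- the 'new' string of iteration i = m (1 ≤ m < n) is the rotation at cut n - m
lemma new_eq_rot (a : List Char) (m : Nat) (h1 : 1 ≤ m) (h2 : m < a.length) :
    PySem.List.slice a (some (-(m : Int))) none ++
      PySem.List.slice a (some 0) (some ((a.length : Int) - (m : Int))) =
    rotAt a (a.length - m) := by
  have hc : (a.length : Int) - (m : Int) = ((a.length - m : Nat) : Int) := by omega
  rw [PySem.List.slice_from_neg_natCast a m h1, hc]
  simp [rotAt, PySem.List.slice_to_natCast]

-- ---- B-side: spec of PySem.Chars.rfind.go (largest matching start position) ----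
lemma go_none (s sub : List Char) (k : Nat)
    (h : ∀ j ≤ k, ¬ sub.isPrefixOf (s.drop j)) :
    PySem.Chars.rfind.go s sub k = -1 := by
  induction k with
  | zero =>
      simp only [PySem.Chars.rfind.go]
      rw [if_neg]
      simpa using h 0 (le_refl 0)
  | succ k ih =>
      simp only [PySem.Chars.rfind.go]
      rw [if_neg]
      · exact ih (fun j hj => h j (Nat.le_succ_of_le hj))
      · simpa using h (k+1) (le_refl _)

lemma go_max (s sub : List Char) (k j : Nat) (hj : j ≤ k)
    (hpre : sub.isPrefixOf (s.drop j))
    (hmax : ∀ j', j < j' → j' ≤ k → ¬ sub.isPrefixOf (s.drop j')) :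
    PySem.Chars.rfind.go s sub k = (j : Int) := by
  induction k with
  | zero =>
      interval_cases j
      simp only [PySem.Chars.rfind.go]
      rw [if_pos (by simpa using hpre)]
      rfl
  | succ k ih =>
      simp only [PySem.Chars.rfind.go]
      by_cases hk : j = k + 1
      · subst hk; rw [if_pos hpre]
      · rw [if_neg (hmax (k+1) (by omega) (le_refl _))]
        exact ih (by omega) (fun j' h1 h2 => hmax j' h1 (by omega))

-- a prefix at position j - 1 of the searched window of A+A is exactly the rotation match at cut j
lemma prefix_window_iff (a b : List Char) (hlen : b.length = a.length) (hn : 1 ≤ a.length)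
    (j : Nat) (hj : 1 ≤ j) :
    b.isPrefixOf ((((a ++ a).take (2 * a.length - 1)).drop 1).drop (j - 1)) = true ↔
      (j ≤ a.length - 1 ∧ b = rotAt a j) := by
  set n := a.length with hn'
  have hdd : (((a ++ a).take (2 * n - 1)).drop 1).drop (j - 1) = ((a ++ a).take (2 * n - 1)).drop j := by
    rw [List.drop_drop]; congr 1; omega
  rw [hdd, List.isPrefixOf_iff_prefix, List.drop_take, List.prefix_take_iff]
  by_cases hjn : j ≤ n - 1
  · have hd : (a ++ a).drop j = a.drop j ++ a := by
      rw [List.drop_append_of_le_length (by omega)]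
    have htake : (a.drop j ++ a).take n = rotAt a j := by
      rw [List.take_append, List.take_of_length_le (by simp [hn']), List.length_drop]
      unfold rotAt
      have h3 : n - (n - j) = j := by omega
      rw [h3]
    rw [hd]
    constructor
    · rintro ⟨hp, -⟩
      exact ⟨hjn, by rw [List.prefix_iff_eq_take.mp hp, hlen, htake]⟩
    · rintro ⟨-, hb⟩
      refine ⟨?_, by omega⟩
      rw [List.prefix_iff_eq_take, hlen, htake]
      exact hb
  · constructor
    · rintro ⟨-, hl⟩; omega
    · rintro ⟨h, -⟩; omega

-- evaluation of rfindFrom at the concrete bounds B uses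
lemma rfindFrom_eval (a b : List Char) (hn : 1 ≤ a.length) :
    PySem.Chars.rfindFrom (a ++ a) b 1 (some (2 * (a.length : Int) - 1)) =
      (if PySem.Chars.rfind (((a ++ a).take (2 * a.length - 1)).drop 1) b = -1 then -1
       else 1 + PySem.Chars.rfind (((a ++ a).take (2 * a.length - 1)).drop 1) b) := by
  have hn' : (1 : Int) ≤ (a.length : Int) := by exact_mod_cast hn
  simp only [PySem.Chars.rfindFrom, List.length_append]
  rw [if_neg (by push_cast; omega : ¬ (((a.length + a.length : Nat) : Int) < 2 * (a.length : Int) - 1))]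
  rw [if_neg (by omega : ¬ ((2 : Int) * (a.length : Int) - 1 < 0))]
  rw [if_neg (by omega : ¬ ((1 : Int) < (0 : Int)))]
  rw [if_neg (by omega : ¬ ((2 : Int) * (a.length : Int) - 1 < 1))]
  rw [(by omega : ((2 : Int) * (a.length : Int) - 1).toNat = 2 * a.length - 1)]
  rw [(by omega : ((1 : Int)).toNat = 1)]

-- ===== VERDICT (by name: the statement is the Claim_ definition above) =====
theorem solution_spec : Claim_equal_solution := by
  intro A B _
  unfold Spec_solution solution solution_alt
  set a := A.toList with ha
  set b := B.toList with hb
  by_cases hab : a = b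
  · rw [if_pos hab, if_pos hab]
  rw [if_neg hab, if_neg hab]
  by_cases hlen : a.length = b.length
  case neg =>
    rw [if_pos hlen]
    apply solLoop_all_ne
    intro i hi
    rw [PySem.List.mem_pyRange_one] at hi
    obtain ⟨h1, h2⟩ := hi
    have him : i = ((i.toNat : Nat) : Int) := by omega
    rw [him, new_eq_rot a i.toNat (by omega) (by omega)]
    intro hc
    apply hlen
    rw [← hc, length_rotAt a _ (by omega)]
  case pos =>
    rw [if_neg (by omega)]
    show solLoop a b (PySem.List.pyRange 1 (a.length : Int) 1) =
      (if PySem.Chars.rfindFrom (a ++ a) b 1 (some (2 * (a.length : Int) - 1)) = -1 then -1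
       else (a.length : Int) - PySem.Chars.rfindFrom (a ++ a) b 1 (some (2 * (a.length : Int) - 1)))
    have hn1 : 1 ≤ a.length := by
      by_contra h
      apply hab
      have h0 : a = [] := List.eq_nil_of_length_eq_zero (by omega)
      have h0' : b = [] := List.eq_nil_of_length_eq_zero (by omega)
      rw [h0, h0']
    have hs'len : ((((a ++ a).take (2 * a.length - 1)).drop 1)).length = 2 * a.length - 2 := by
      simp
      omega
    have hrfind : PySem.Chars.rfind (((a ++ a).take (2 * a.length - 1)).drop 1) b =
        PySem.Chars.rfind.go (((a ++ a).take (2 * a.length - 1)).drop 1) b (2 * a.length - 2) := by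
      rw [PySem.Chars.rfind, hs'len]
    by_cases hex : ∃ j, j ≤ a.length - 1 ∧ 1 ≤ j ∧ b = rotAt a j
    · -- a rotation matches: A returns the smallest shift, B the same index via the rightmost position
      obtain ⟨j0, hj0le, hj01, hj0rot⟩ := hex
      have hjmP := Nat.findGreatest_spec (P := fun j => 1 ≤ j ∧ b = rotAt a j) hj0le ⟨hj01, hj0rot⟩
      set jm := Nat.findGreatest (fun j => 1 ≤ j ∧ b = rotAt a j) (a.length - 1) with hjm'
      have hjmle : jm ≤ a.length - 1 := Nat.findGreatest_le (a.length - 1)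
      have hjm1 : 1 ≤ jm := hjmP.1
      have hgr : ∀ m, jm < m → m ≤ a.length - 1 → ¬ (1 ≤ m ∧ b = rotAt a m) := by
        intro m h1 h2
        exact Nat.findGreatest_is_greatest (by rw [← hjm']; omega) h2
      -- A side: split the range at the first matching shift n - jm
      have hsplit : PySem.List.pyRange 1 (a.length : Int) 1 =
          PySem.List.pyRange 1 ((a.length - jm : Nat) : Int) 1 ++
            PySem.List.pyRange ((a.length - jm : Nat) : Int) (a.length : Int) 1 := by
        rw [PySem.List.pyRange_one_append 1 ((a.length - jm : Nat) : Int) (a.length : Int) (by omega) (by omega)]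
      rw [hsplit, solLoop_append]
      · rw [PySem.List.pyRange_one_cons (by omega : ((a.length - jm : Nat) : Int) < (a.length : Int))]
        simp only [solLoop]
        rw [if_pos]
        · -- both sides return n - jm
          rw [rfindFrom_eval a b hn1, hrfind]
          rw [go_max (((a ++ a).take (2 * a.length - 1)).drop 1) b (2 * a.length - 2) (jm - 1) (by omega)]
          · rw [if_neg (by omega), if_neg (by omega)]
            omega
          · exact (prefix_window_iff a b hlen.symm hn1 jm hjm1).mpr ⟨hjmle, hjmP.2⟩
          · intro j' hlt hle hpre
            have h := (prefix_window_iff a b hlen.symm hn1 (j' + 1) (by omega)).mp (by simpa using hpre)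
            exact hgr (j' + 1) (by omega) h.1 ⟨by omega, h.2⟩
        · rw [new_eq_rot a (a.length - jm) (by omega) (by omega)]
          have h4 : a.length - (a.length - jm) = jm := by omega
          rw [h4]
          exact hjmP.2.symm
      · intro i hi
        rw [PySem.List.mem_pyRange_one] at hi
        obtain ⟨h1, h2⟩ := hi
        have him : i = ((i.toNat : Nat) : Int) := by omega
        rw [him, new_eq_rot a i.toNat (by omega) (by omega)]
        intro hc
        exact hgr (a.length - i.toNat) (by omega) (by omega) ⟨by omega, hc.symm⟩
    · -- no rotation matches: both return -1
      rw [rfindFrom_eval a b hn1, hrfind, go_none]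
      · rw [if_pos rfl, if_pos rfl]
        apply solLoop_all_ne
        intro i hi
        rw [PySem.List.mem_pyRange_one] at hi
        obtain ⟨h1, h2⟩ := hi
        have him : i = ((i.toNat : Nat) : Int) := by omega
        rw [him, new_eq_rot a i.toNat (by omega) (by omega)]
        intro hc
        exact hex ⟨a.length - i.toNat, by omega, by omega, hc.symm⟩
      · intro j' hle hpre
        have h := (prefix_window_iff a b hlen.symm hn1 (j' + 1) (by omega)).mp (by simpa using hpre)
        exact hex ⟨j' + 1, h.1, by omega, h.2⟩
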